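-- pv_equiv track=rewrite | github.com/khadafigans/React2Shell | extract.py | extract_smtp
-- ===== SOURCE A (Python) =====
-- def extract_smtp(env_vars: dict, url: str) -> dict:
--     """Extract SMTP credentials"""
--     smtp_info = {'url': url}
--
--     # SMTP Host
--     host_keys = ['SMTP_HOST', 'MAIL_HOST', 'EMAIL_HOST', 'SMTP_SERVER', 'MAIL_SERVER']
--     for key in host_keys:
--         if key in env_vars:
--             smtp_info['host'] = env_vars[key]
--             break
--
--     # SMTP Port
--     port_keys = ['SMTP_PORT', 'MAIL_PORT', 'EMAIL_PORT']
--     for key in port_keys: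
--         if key in env_vars:
--             smtp_info['port'] = env_vars[key]
--             break
--
--     # SMTP Username
--     user_keys = ['SMTP_USERNAME', 'SMTP_USER', 'MAIL_USERNAME', 'MAIL_USER', 'EMAIL_USER', 'EMAIL_USERNAME']
--     for key in user_keys:
--         if key in env_vars:
--             smtp_info['username'] = env_vars[key]
--             break
--
--     # SMTP Password
--     pass_keys = ['SMTP_PASSWORD', 'SMTP_PASS', 'MAIL_PASSWORD', 'MAIL_PASS', 'EMAIL_PASSWORD', 'EMAIL_PASS']
--     for key in pass_keys:
--         if key in env_vars:
--             smtp_info['password'] = env_vars[key]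
--             break
--
--     # From Email
--     from_keys = ['SMTP_FROM_MAIL', 'SMTP_FROM', 'MAIL_FROM', 'MAIL_FROM_ADDRESS', 'EMAIL_FROM']
--     for key in from_keys:
--         if key in env_vars:
--             smtp_info['from_mail'] = env_vars[key]
--             break
--
--     return smtp_info if 'host' in smtp_info or 'username' in smtp_info else None
-- ===== SOURCE B (Python) =====
-- _SPEC = [
--     ('host', ['SMTP_HOST', 'MAIL_HOST', 'EMAIL_HOST', 'SMTP_SERVER', 'MAIL_SERVER']),
--     ('port', ['SMTP_PORT', 'MAIL_PORT', 'EMAIL_PORT']),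
--     ('username', ['SMTP_USERNAME', 'SMTP_USER', 'MAIL_USERNAME', 'MAIL_USER', 'EMAIL_USER', 'EMAIL_USERNAME']),
--     ('password', ['SMTP_PASSWORD', 'SMTP_PASS', 'MAIL_PASSWORD', 'MAIL_PASS', 'EMAIL_PASSWORD', 'EMAIL_PASS']),
--     ('from_mail', ['SMTP_FROM_MAIL', 'SMTP_FROM', 'MAIL_FROM', 'MAIL_FROM_ADDRESS', 'EMAIL_FROM']),
-- ]
--
-- # key -> (field, priority): invert the candidate lists once
-- _RANK = {k: (field, i) for field, keys in _SPEC for i, k in enumerate(keys)}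
--
-- _FIELDS = ['host', 'port', 'username', 'password', 'from_mail']
--
--
-- def extract_smtp(env_vars: dict, url: str) -> dict:
--     """Extract SMTP credentials: one pass over env_vars, keeping the
--     best-priority (lowest rank) match per field."""
--     best = {}
--     for k, v in env_vars.items():
--         tag = _RANK.get(k)
--         if tag is not None:
--             field, r = tag
--             cur = best.get(field)
--             if cur is None or r < cur[0]:
--                 best[field] = (r, v)
--     smtp_info = {'url': url}
--     for field in _FIELDS:
--         if field in best:
--             smtp_info[field] = best[field][1]
--     return smtp_info if 'host' in smtp_info or 'username' in smtp_info else None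
-- ===== Notes on version B (the rewrite author's own statement) =====
-- stated objective: alternative
-- what changed: Inverts the iteration: instead of five ordered scans over candidate key lists probing the dict, B makes a single pass over the env entries, classifying each key via a precomputed key->(field,priority) map and keeping the lowest-priority match per field.
import Mathlib
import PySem

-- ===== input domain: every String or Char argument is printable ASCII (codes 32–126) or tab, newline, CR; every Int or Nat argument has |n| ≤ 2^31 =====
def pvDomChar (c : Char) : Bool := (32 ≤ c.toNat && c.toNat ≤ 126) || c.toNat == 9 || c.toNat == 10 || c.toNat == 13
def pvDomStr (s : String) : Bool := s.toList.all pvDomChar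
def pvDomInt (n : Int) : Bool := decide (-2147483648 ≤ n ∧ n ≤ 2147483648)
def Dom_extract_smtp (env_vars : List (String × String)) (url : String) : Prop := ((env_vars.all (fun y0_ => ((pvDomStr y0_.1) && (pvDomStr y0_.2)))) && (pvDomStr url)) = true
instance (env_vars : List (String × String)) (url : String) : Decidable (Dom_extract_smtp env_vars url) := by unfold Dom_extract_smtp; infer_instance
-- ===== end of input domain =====

-- B inverts the iteration: one pass over env entries with a key->(field,priority) map
-- keeping the lowest-priority match per field, instead of A's five ordered key scans
-- probing the dict (objective: alternative; return value only).

-- ===== PORT A =====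
-- one 'for key in keys: if key in env_vars: smtp_info[field] = env_vars[key]; break' loop
def pvLoopA (env : List (String × String)) (field : String)
    (keys : List String) (d : PySem.Dict String String) : PySem.Dict String String :=
  match keys with
  | [] => d
  | k :: rest =>
    match List.lookup k env with      -- 'key in env_vars' + 'env_vars[key]' (first match)
    | some v => d.insert field v      -- then break
    | none => pvLoopA env field rest d

def extract_smtp (env_vars : List (String × String)) (url : String) :
    Option (List (String × String)) :=
  let s0 := PySem.Dict.insert PySem.Dict.empty "url" url
  let s1 := pvLoopA env_vars "host" ["SMTP_HOST", "MAIL_HOST", "EMAIL_HOST", "SMTP_SERVER", "MAIL_SERVER"] s0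
  let s2 := pvLoopA env_vars "port" ["SMTP_PORT", "MAIL_PORT", "EMAIL_PORT"] s1
  let s3 := pvLoopA env_vars "username" ["SMTP_USERNAME", "SMTP_USER", "MAIL_USERNAME", "MAIL_USER", "EMAIL_USER", "EMAIL_USERNAME"] s2
  let s4 := pvLoopA env_vars "password" ["SMTP_PASSWORD", "SMTP_PASS", "MAIL_PASSWORD", "MAIL_PASS", "EMAIL_PASSWORD", "EMAIL_PASS"] s3
  let s5 := pvLoopA env_vars "from_mail" ["SMTP_FROM_MAIL", "SMTP_FROM", "MAIL_FROM", "MAIL_FROM_ADDRESS", "EMAIL_FROM"] s4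
  if s5.contains "host" || s5.contains "username" then some s5.items else none

-- ===== PORT B =====
-- _RANK = {k: (field, i) for field, keys in _SPEC for i, k in enumerate(keys)}
-- (the _SPEC key lists are pairwise disjoint, so the dict's items are this literal list)
def pvRank : List (String × (String × Nat)) :=
  [("SMTP_HOST", ("host", 0)), ("MAIL_HOST", ("host", 1)), ("EMAIL_HOST", ("host", 2)),
   ("SMTP_SERVER", ("host", 3)), ("MAIL_SERVER", ("host", 4)),
   ("SMTP_PORT", ("port", 0)), ("MAIL_PORT", ("port", 1)), ("EMAIL_PORT", ("port", 2)),
   ("SMTP_USERNAME", ("username", 0)), ("SMTP_USER", ("username", 1)), ("MAIL_USERNAME", ("username", 2)),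
   ("MAIL_USER", ("username", 3)), ("EMAIL_USER", ("username", 4)), ("EMAIL_USERNAME", ("username", 5)),
   ("SMTP_PASSWORD", ("password", 0)), ("SMTP_PASS", ("password", 1)), ("MAIL_PASSWORD", ("password", 2)),
   ("MAIL_PASS", ("password", 3)), ("EMAIL_PASSWORD", ("password", 4)), ("EMAIL_PASS", ("password", 5)),
   ("SMTP_FROM_MAIL", ("from_mail", 0)), ("SMTP_FROM", ("from_mail", 1)), ("MAIL_FROM", ("from_mail", 2)),
   ("MAIL_FROM_ADDRESS", ("from_mail", 3)), ("EMAIL_FROM", ("from_mail", 4))]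

def pvFields : List String := ["host", "port", "username", "password", "from_mail"]

-- body of B's single 'for k, v in env_vars.items()' loop
def pvStepB (b : PySem.Dict String (Nat × String)) (kv : String × String) :
    PySem.Dict String (Nat × String) :=
  match List.lookup kv.1 pvRank with
  | some (field, r) =>
    match b.get? field with
    | none => b.insert field (r, kv.2)
    | some cur => if r < cur.1 then b.insert field (r, kv.2) else b
  | none => b

def extract_smtp_alt (env_vars : List (String × String)) (url : String) :
    Option (List (String × String)) :=
  let best := env_vars.foldl pvStepB PySem.Dict.empty
  let d := pvFields.foldl
    (fun d f =>
      match best.get? f with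
      | some p => d.insert f p.2
      | none => d)
    (PySem.Dict.insert PySem.Dict.empty "url" url)
  if d.contains "host" || d.contains "username" then some d.items else none

-- ===== PRECONDITION & SPEC =====
def Spec_extract_smtp (env_vars : List (String × String)) (url : String) (out : Option (List (String × String))) : Prop := out = extract_smtp_alt env_vars url
instance (env_vars : List (String × String)) (url : String) (out : Option (List (String × String))) : Decidable (Spec_extract_smtp env_vars url out) := by unfold Spec_extract_smtp; infer_instance

-- ===== CLAIM (what is proved, stated in full; the proofs are below) =====
def Claim_equal_extract_smtp : Prop := ∀ (env_vars : List (String × String)) (url : String), Dom_extract_smtp env_vars url → Spec_extract_smtp env_vars url (extract_smtp env_vars url)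

-- ===== LEMMAS AND PROOFS =====

-- left-biased strict-min-by-rank selection (what B's 'cur is None or r < cur[0]' keeps)
def pvSel (a c : Option (Nat × String)) : Option (Nat × String) :=
  match c with
  | none => a
  | some (r, v) =>
    match a with
    | none => some (r, v)
    | some (r0, v0) => if r < r0 then some (r, v) else some (r0, v0)

-- B's per-field view of the rank map
def pvRho (f k : String) : Option Nat :=
  match List.lookup k pvRank with
  | some (g, r) => if g == f then some r else none
  | none => none

-- B's step, projected to one field
def pvStepR (f : String) (b : Option (Nat × String)) (kv : String × String) :
    Option (Nat × String) :=
  match pvRho f kv.1 with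
  | some r => pvSel b (some (r, kv.2))
  | none => b

-- first (key, rank) entry of L whose key occurs in env, with its looked-up value
def pvScan (L : List (String × Nat)) (env : List (String × String)) : Option (Nat × String) :=
  match L with
  | [] => none
  | (key, r) :: t =>
    match List.lookup key env with
    | some v => some (r, v)
    | none => pvScan t env

-- the tagged key list of one field, in priority order
def pvL (f : String) : List (String × Nat) :=
  pvRank.filterMap (fun p => if p.2.1 == f then some (p.1, p.2.2) else none)

theorem pvSel_none (c : Option (Nat × String)) : pvSel none c = c := by
  cases c with
  | none => rfl
  | some p => cases p; rfl

theorem pvSel_assoc (a b c : Option (Nat × String)) :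
    pvSel (pvSel a b) c = pvSel a (pvSel b c) := by
  cases c with
  | none => rfl
  | some pc =>
    obtain ⟨rc, vc⟩ := pc
    cases b with
    | none => cases a <;> rfl
    | some pb =>
      obtain ⟨rb, vb⟩ := pb
      cases a with
      | none => rw [pvSel_none, pvSel_none]
      | some pa =>
        obtain ⟨ra, va⟩ := pa
        by_cases h1 : rb < ra <;> by_cases h2 : rc < rb <;> by_cases h3 : rc < ra <;>
          simp [pvSel, h1, h2, h3] <;> omega

theorem pvScan_nil (L : List (String × Nat)) : pvScan L [] = none := by
  induction L with
  | nil => rfl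
  | cons p t ih => obtain ⟨key, r⟩ := p; simpa [pvScan, List.lookup] using ih

theorem lookup_mem {α β : Type} [BEq α] [LawfulBEq α] {k : α} {v : β} {l : List (α × β)}
    (h : List.lookup k l = some v) : (k, v) ∈ l := by
  induction l with
  | nil => simp [List.lookup] at h
  | cons p t ih =>
    cases p with
    | mk k' v' =>
      simp only [List.lookup] at h
      by_cases hk : k = k'
      · subst hk; simp at h; subst h; exact List.mem_cons_self
      · rw [beq_eq_false_iff_ne.mpr hk] at h
        exact List.mem_cons_of_mem _ (ih h)

-- keys of L absent from the head of env: the head is invisible to the scan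
theorem pvScan_cons_of_not_key (L : List (String × Nat)) (k v : String) (rest : List (String × String))
    (h : ∀ p ∈ L, p.1 ≠ k) :
    pvScan L ((k, v) :: rest) = pvScan L rest := by
  induction L with
  | nil => rfl
  | cons p t ih =>
    obtain ⟨key, r⟩ := p
    have hk : key ≠ k := h (key, r) List.mem_cons_self
    simp only [pvScan, List.lookup, beq_eq_false_iff_ne.mpr hk]
    cases List.lookup key rest with
    | some w => rfl
    | none => exact ih (fun q hq => h q (List.mem_cons_of_mem _ hq))

theorem pvScan_rank_mem (L : List (String × Nat)) (env : List (String × String))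
    (r : Nat) (v : String) (h : pvScan L env = some (r, v)) : ∃ k, (k, r) ∈ L := by
  induction L with
  | nil => simp [pvScan] at h
  | cons p t ih =>
    obtain ⟨key, r'⟩ := p
    simp only [pvScan] at h
    cases hl : List.lookup key env with
    | some w =>
      rw [hl] at h; simp at h
      exact ⟨key, by simp [h.1]⟩
    | none =>
      rw [hl] at h
      obtain ⟨k, hk⟩ := ih h
      exact ⟨k, List.mem_cons_of_mem _ hk⟩

-- head of env is a ranked key: the scan result is the min-by-rank merge
theorem pvScan_cons_of_key (L : List (String × Nat)) (k v : String) (rest : List (String × String))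
    (r : Nat) (hpw : L.Pairwise (fun p q => p.2 < q.2)) (hmem : (k, r) ∈ L)
    (huniq : ∀ p ∈ L, p.1 = k → p.2 = r) :
    pvScan L ((k, v) :: rest) = pvSel (some (r, v)) (pvScan L rest) := by
  induction L with
  | nil => simp at hmem
  | cons p t ih =>
    obtain ⟨key, r'⟩ := p
    by_cases hk : key = k
    · subst hk
      have hr : r' = r := huniq (key, r') List.mem_cons_self rfl
      subst hr
      simp only [pvScan, List.lookup, beq_self_eq_true]
      cases hl : List.lookup key rest with
      | some w => simp [pvSel]
      | none =>
        cases hs : pvScan t rest with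
        | none => rfl
        | some q =>
          obtain ⟨r2, v2⟩ := q
          obtain ⟨k2, hk2⟩ := pvScan_rank_mem t rest r2 v2 hs
          have : r' < r2 := (List.pairwise_cons.mp hpw).1 (k2, r2) hk2
          simp only [pvSel]
          rw [if_neg (by omega)]
    · have hmem' : (k, r) ∈ t := by
        cases hmem with
        | head => exact absurd rfl hk
        | tail _ h => exact h
      have hlt : r' < r := (List.pairwise_cons.mp hpw).1 (k, r) hmem'
      simp only [pvScan, List.lookup, beq_eq_false_iff_ne.mpr hk]
      cases hl : List.lookup key rest with
      | some w => simp only [pvSel]; rw [if_pos hlt]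
      | none =>
        exact ih (List.pairwise_cons.mp hpw).2 hmem'
          (fun q hq hq1 => huniq q (List.mem_cons_of_mem _ hq) hq1)

-- B's per-field fold over env = the scan of that field's tagged key list
theorem foldl_stepR_eq_scan (f : String) (L : List (String × Nat))
    (hpw : L.Pairwise (fun p q => p.2 < q.2))
    (hmemL : ∀ p ∈ L, pvRho f p.1 = some p.2)
    (hcov : ∀ k r, pvRho f k = some r → (k, r) ∈ L) :
    ∀ (env : List (String × String)) (b : Option (Nat × String)),
      env.foldl (pvStepR f) b = pvSel b (pvScan L env) := by
  intro env
  induction env with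
  | nil => intro b; rw [pvScan_nil]; rfl
  | cons kv rest ih =>
    intro b
    cases kv with
    | mk k v =>
      simp only [List.foldl]
      cases hρ : pvRho f k with
      | none =>
        have hnk : ∀ p ∈ L, p.1 ≠ k := by
          intro p hp hpk
          have := hmemL p hp
          rw [hpk, hρ] at this
          simp at this
        rw [pvScan_cons_of_not_key L k v rest hnk]
        have hstep : pvStepR f b (k, v) = b := by simp [pvStepR, hρ]
        rw [hstep, ih b]
      | some r =>
        have hmem : (k, r) ∈ L := hcov k r hρ
        have huniq : ∀ p ∈ L, p.1 = k → p.2 = r := by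
          intro p hp hpk
          have := hmemL p hp
          rw [hpk, hρ] at this
          injection this with h2
          exact h2.symm
        have hstep : pvStepR f b (k, v) = pvSel b (some (r, v)) := by
          simp [pvStepR, hρ]
        rw [hstep, ih (pvSel b (some (r, v))), pvSel_assoc,
          ← pvScan_cons_of_key L k v rest r hpw hmem huniq]

-- B's dict step, observed at any one field, is the per-field step
theorem stepB_get? (b : PySem.Dict String (Nat × String)) (kv : String × String) (f : String) :
    (pvStepB b kv).get? f = pvStepR f (b.get? f) kv := by
  obtain ⟨k, v⟩ := kv
  simp only [pvStepB, pvStepR, pvRho]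
  cases hl : List.lookup k pvRank with
  | none => rfl
  | some gr =>
    obtain ⟨g, r⟩ := gr
    dsimp only
    by_cases hgf : g = f
    · subst hgf
      rw [if_pos (beq_self_eq_true g)]
      cases hbg : b.get? g with
      | none => simp [PySem.Dict.get?_insert_self, pvSel]
      | some cur =>
        obtain ⟨r0, v0⟩ := cur
        by_cases hr : r < r0
        · simp [hr, PySem.Dict.get?_insert_self, pvSel]
        · simp [hr, pvSel, hbg]
    · rw [if_neg (by simp [hgf])]
      have hfg : f ≠ g := fun h => hgf h.symm
      cases b.get? g with
      | none => dsimp only; exact PySem.Dict.get?_insert_of_ne _ _ hfg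
      | some cur =>
        obtain ⟨r0, v0⟩ := cur
        dsimp only
        by_cases hr : r < r0
        · rw [if_pos hr]; exact PySem.Dict.get?_insert_of_ne _ _ hfg
        · rw [if_neg hr]

theorem foldl_stepB_get? (env : List (String × String)) (f : String) :
    ∀ b : PySem.Dict String (Nat × String),
      (env.foldl pvStepB b).get? f = env.foldl (pvStepR f) (b.get? f) := by
  induction env with
  | nil => intro b; rfl
  | cons kv rest ih =>
    intro b
    simp only [List.foldl]
    rw [ih (pvStepB b kv), stepB_get? b kv f]

-- value component of the scan = first-match search over the bare key list
theorem pvScan_map_snd (L : List (String × Nat)) (env : List (String × String)) :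
    (pvScan L env).map Prod.snd = (L.map Prod.fst).findSome? (fun k => List.lookup k env) := by
  induction L with
  | nil => rfl
  | cons p t ih =>
    cases p with
    | mk key r =>
      simp only [pvScan, List.map, List.findSome?]
      cases List.lookup key env with
      | some v => rfl
      | none => exact ih

-- A's break-loop equals "first found value, inserted if any"
theorem pvLoopA_eq_findSome? (env : List (String × String)) (field : String)
    (keys : List String) (d : PySem.Dict String String) :
    pvLoopA env field keys d =
      match keys.findSome? (fun k => List.lookup k env) with
      | some v => d.insert field v
      | none => d := by
  induction keys with
  | nil => rfl
  | cons k rest ih =>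
    simp only [pvLoopA, List.findSome?]
    cases List.lookup k env with
    | some v => rfl
    | none => exact ih

-- best.get? f for one field f, fully characterised
theorem best_get (f : String) (L : List (String × Nat))
    (hpw : L.Pairwise (fun p q => p.2 < q.2))
    (hmemL : ∀ p ∈ L, pvRho f p.1 = some p.2)
    (hcov : ∀ k r, pvRho f k = some r → (k, r) ∈ L)
    (env : List (String × String)) :
    (env.foldl pvStepB PySem.Dict.empty).get? f = pvScan L env := by
  rw [foldl_stepB_get?, PySem.Dict.get?_empty, foldl_stepR_eq_scan f L hpw hmemL hcov, pvSel_none]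

-- the coverage hypothesis, once for all five fields
theorem pvRho_cov (f k : String) (r : Nat) (h : pvRho f k = some r) : (k, r) ∈ pvL f := by
  unfold pvRho at h
  cases hl : List.lookup k pvRank with
  | none => rw [hl] at h; simp at h
  | some gr =>
    obtain ⟨g, r'⟩ := gr
    rw [hl] at h
    dsimp only at h
    by_cases hgf : g = f
    · subst hgf
      rw [if_pos (beq_self_eq_true g)] at h
      injection h with h2
      subst h2
      exact List.mem_filterMap.mpr ⟨(k, (g, r')), lookup_mem hl, by simp⟩
    · rw [if_neg (by simp [hgf])] at h
      exact absurd h (by simp)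

-- insert-if-some congruence between the two option shapes
theorem pvIns_congr (o : Option (Nat × String)) (f : String) (d : PySem.Dict String String) :
    (match o with
     | some p => d.insert f p.2
     | none => d) =
    (match o.map Prod.snd with
     | some v => d.insert f v
     | none => d) := by
  cases o with
  | none => rfl
  | some p => cases p; rfl

-- ===== VERDICT (by name: the statement is the Claim_ definition above) =====
theorem extract_smtp_spec : Claim_equal_extract_smtp := by
  intro env url _
  show extract_smtp env url = extract_smtp_alt env url
  have hhost := best_get "host" (pvL "host") (by decide) (by decide) (pvRho_cov "host") env
  have hport := best_get "port" (pvL "port") (by decide) (by decide) (pvRho_cov "port") env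
  have huser := best_get "username" (pvL "username") (by decide) (by decide) (pvRho_cov "username") env
  have hpass := best_get "password" (pvL "password") (by decide) (by decide) (pvRho_cov "password") env
  have hfrom := best_get "from_mail" (pvL "from_mail") (by decide) (by decide) (pvRho_cov "from_mail") env
  simp only [extract_smtp, extract_smtp_alt, pvFields, List.foldl,
    pvLoopA_eq_findSome?, hhost, hport, huser, hpass, hfrom,
    pvIns_congr, pvScan_map_snd]
  rfl
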